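-- pv_equiv track=rewrite | github.com/David38mk/App_for_public_procurement | task_force/scripts/extract_tender_context.py | pick_section_text_with_keywords
-- ===== SOURCE A (Python) =====
-- def pick_section_text(sections: dict[str, dict[str, str]], keys: list[str]) -> str:
--     for key in keys:
--         payload = sections.get(key)
--         if payload and payload.get("text"):
--             return payload["text"]
--     return ""
--
-- def pick_section_text_with_keywords(
--     sections: dict[str, dict[str, str]],
--     keys: list[str],
--     keywords: list[str],
-- ) -> str:
--     for key in keys:
--         payload = sections.get(key)
--         if not payload:
--             continue
--         txt = payload.get("text", "")
--         low = txt.lower()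
--         if any(kw in low for kw in keywords):
--             return txt
--     return pick_section_text(sections, keys)
-- ===== SOURCE B (Python) =====
-- def pick_section_text_with_keywords(sections, keys, keywords):
--     # Single forward pass: return on first keyword hit, remember first truthy text as fallback.
--     fallback = None
--     for key in keys:
--         payload = sections.get(key)
--         if not payload:
--             continue
--         txt = payload.get("text", "")
--         if any(kw in txt.lower() for kw in keywords):
--             return txt
--         if txt and fallback is None:
--             fallback = txt
--     return fallback if fallback is not None else ""
-- ===== Notes on version B (the rewrite author's own statement) =====
-- stated objective: simpler
-- what changed: Merged A's keyword scan plus its separate pick_section_text fallback re-scan into one forward pass that maintains a nullable fallback variable.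
import Mathlib
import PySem

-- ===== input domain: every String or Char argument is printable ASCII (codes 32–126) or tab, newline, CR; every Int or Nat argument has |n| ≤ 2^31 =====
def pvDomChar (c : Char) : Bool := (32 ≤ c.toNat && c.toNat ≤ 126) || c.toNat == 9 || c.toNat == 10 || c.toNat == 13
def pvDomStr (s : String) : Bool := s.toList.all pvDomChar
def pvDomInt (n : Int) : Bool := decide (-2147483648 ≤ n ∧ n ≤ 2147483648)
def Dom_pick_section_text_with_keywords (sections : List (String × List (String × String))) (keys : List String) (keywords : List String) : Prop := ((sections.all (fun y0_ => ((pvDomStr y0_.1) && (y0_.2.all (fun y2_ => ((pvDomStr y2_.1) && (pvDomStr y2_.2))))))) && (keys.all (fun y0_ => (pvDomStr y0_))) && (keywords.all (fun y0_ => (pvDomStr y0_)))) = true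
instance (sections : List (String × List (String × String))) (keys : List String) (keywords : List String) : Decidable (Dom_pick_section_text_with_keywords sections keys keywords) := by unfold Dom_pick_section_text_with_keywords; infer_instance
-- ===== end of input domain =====

-- B merges A's keyword scan and its separate fallback re-scan into one forward pass over keys with a nullable fallback accumulator (same return value, one pass instead of two).


-- ===== PORT A =====
-- Port of A: a keyword loop (early return modelled as Option) followed, on fall-through,
-- by the separate pick_section_text fallback scan, exactly as in the Python.
def pvA_pick_section_text (sections : List (String × List (String × String))) (keys : List String) : String :=
  match keys with
  | [] => ""
  | key :: rest =>
    match (PySem.Dict.mk sections).get? key with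
    | none => pvA_pick_section_text sections rest
    | some payload =>
      if payload.isEmpty then pvA_pick_section_text sections rest
      else
        match (PySem.Dict.mk payload).get? "text" with
        | none => pvA_pick_section_text sections rest
        | some t => if t = "" then pvA_pick_section_text sections rest else t

def pvA_kwloop (sections : List (String × List (String × String))) (keywords : List String) (keys : List String) : Option String :=
  match keys with
  | [] => none
  | key :: rest =>
    match (PySem.Dict.mk sections).get? key with
    | none => pvA_kwloop sections keywords rest
    | some payload =>
      if payload.isEmpty then pvA_kwloop sections keywords rest
      else
        let txt := (PySem.Dict.mk payload).getD "text" ""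
        let low := PySem.Str.lower txt
        if keywords.any (fun kw => PySem.Str.isIn kw low) then some txt
        else pvA_kwloop sections keywords rest

def pick_section_text_with_keywords (sections : List (String × List (String × String))) (keys : List String) (keywords : List String) : String :=
  match pvA_kwloop sections keywords keys with
  | some t => t
  | none => pvA_pick_section_text sections keys

-- ===== PORT B =====
-- Port of B: one forward pass over keys maintaining a nullable fallback.
def pvB_go (sections : List (String × List (String × String))) (keywords : List String) (fallback : Option String) (keys : List String) : String :=
  match keys with
  | [] => match fallback with | some f => f | none => ""
  | key :: rest =>
    match (PySem.Dict.mk sections).get? key with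
    | none => pvB_go sections keywords fallback rest
    | some payload =>
      if payload.isEmpty then pvB_go sections keywords fallback rest
      else
        let txt := (PySem.Dict.mk payload).getD "text" ""
        if keywords.any (fun kw => PySem.Str.isIn kw (PySem.Str.lower txt)) then txt
        else if txt ≠ "" ∧ fallback = none then pvB_go sections keywords (some txt) rest
        else pvB_go sections keywords fallback rest

def pick_section_text_with_keywords_alt (sections : List (String × List (String × String))) (keys : List String) (keywords : List String) : String :=
  pvB_go sections keywords none keys

-- ===== PRECONDITION & SPEC =====
def Spec_pick_section_text_with_keywords (sections : List (String × List (String × String))) (keys : List String) (keywords : List String) (out : String) : Prop := out = pick_section_text_with_keywords_alt sections keys keywords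
instance (sections : List (String × List (String × String))) (keys : List String) (keywords : List String) (out : String) : Decidable (Spec_pick_section_text_with_keywords sections keys keywords out) := by unfold Spec_pick_section_text_with_keywords; infer_instance

-- ===== CLAIM (what is proved, stated in full; the proofs are below) =====
def Claim_equal_pick_section_text_with_keywords : Prop := ∀ (sections : List (String × List (String × String))) (keys : List String) (keywords : List String), Dom_pick_section_text_with_keywords sections keys keywords → Spec_pick_section_text_with_keywords sections keys keywords (pick_section_text_with_keywords sections keys keywords)

-- ===== LEMMAS AND PROOFS =====

-- Option-valued version of A's fallback scan (proof helper only).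
def pvPstOpt (sections : List (String × List (String × String))) (keys : List String) : Option String :=
  match keys with
  | [] => none
  | key :: rest =>
    match (PySem.Dict.mk sections).get? key with
    | none => pvPstOpt sections rest
    | some payload =>
      if payload.isEmpty then pvPstOpt sections rest
      else
        let txt := (PySem.Dict.mk payload).getD "text" ""
        if txt = "" then pvPstOpt sections rest else some txt

theorem pvA_pst_eq_opt (sections : List (String × List (String × String))) (keys : List String) :
    pvA_pick_section_text sections keys = (pvPstOpt sections keys).getD "" := by
  induction keys with
  | nil => rfl
  | cons key rest ih =>
    simp only [pvA_pick_section_text, pvPstOpt]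
    cases h : (PySem.Dict.mk sections).get? key with
    | none => exact ih
    | some payload =>
      by_cases hp : payload.isEmpty
      · simp [hp, ih]
      · simp only [hp, Bool.false_eq_true, if_false]
        rw [PySem.Dict.getD_eq_get?_getD]
        cases ht : (PySem.Dict.mk payload).get? "text" with
        | none => simpa using ih
        | some t =>
          by_cases hte : t = ""
          · simp [hte, ih]
          · simp [hte]

theorem pvB_go_eq (sections : List (String × List (String × String))) (keywords : List String)
    (keys : List String) (fallback : Option String) :
    pvB_go sections keywords fallback keys =
      match pvA_kwloop sections keywords keys with
      | some t => t
      | none =>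
        match fallback with
        | some f => f
        | none => (pvPstOpt sections keys).getD "" := by
  induction keys generalizing fallback with
  | nil => rfl
  | cons key rest ih =>
    simp only [pvB_go, pvA_kwloop, pvPstOpt]
    cases h : (PySem.Dict.mk sections).get? key with
    | none => exact ih fallback
    | some payload =>
      by_cases hp : payload.isEmpty
      · simp only [hp, if_true]
        exact ih fallback
      · simp only [hp, Bool.false_eq_true, if_false]
        by_cases hkw : (keywords.any fun kw =>
            PySem.Str.isIn kw (PySem.Str.lower ((PySem.Dict.mk payload).getD "text" ""))) = true
        · simp only [if_pos hkw]
        · simp only [if_neg hkw]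
          by_cases hte : (PySem.Dict.mk payload).getD "text" "" = ""
          · have hc : ¬ (¬ (PySem.Dict.mk payload).getD "text" "" = "" ∧ fallback = none) := by
              simp [hte]
            simp only [ne_eq, if_neg hc, if_pos hte]
            exact ih fallback
          · cases fallback with
            | none =>
              simp only [ne_eq, hte, not_false_eq_true, and_self, if_true, if_false]
              rw [ih (some ((PySem.Dict.mk payload).getD "text" ""))]
              cases pvA_kwloop sections keywords rest <;> simp
            | some f =>
              have hc : ¬ (¬ (PySem.Dict.mk payload).getD "text" "" = "" ∧ (some f : Option String) = none) := by
                simp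
              simp only [ne_eq, if_neg hc]
              rw [ih (some f)]

-- ===== VERDICT (by name: the statement is the Claim_ definition above) =====
theorem pick_section_text_with_keywords_spec : Claim_equal_pick_section_text_with_keywords := by
  intro sections keys keywords _
  unfold Spec_pick_section_text_with_keywords pick_section_text_with_keywords pick_section_text_with_keywords_alt
  rw [pvB_go_eq, pvA_pst_eq_opt]
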